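-- pv_equiv track=rewrite | github.com/PisoMojado/ProjectEuler- | src/euler/common/EratosthenesSieve.py | produce_prime_sum_map_under_n
-- ===== SOURCE A (Python) =====
-- def eratosthenes_sieve_under_n(n):
--     """
--     Eratosthenes' sieve will produce an array of numbers,
--     and another array marking each of those numbers as prime or not (composite)
--     """
--     all_numbers_under_n = [k for k in range(2, n+1)]
--     n_length = len(all_numbers_under_n)
--     prime_flags = [True] * n_length
--     prime_index = 0
--     while prime_index < n_length:
--         prime = all_numbers_under_n[prime_index]
--         coefficient = 2
--         while prime * coefficient <= n:
--             # We subtract the first prime, as our array is structured in this way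
--             prime_flags[prime * coefficient - 2] = False
--             coefficient += 1
--         prime_index += 1
--         while prime_index < n_length and not prime_flags[prime_index]:
--             prime_index += 1
--     return all_numbers_under_n, prime_flags
--
-- def produce_prime_sum_map_under_n(n):
--     """
--     This function is similar to eratosthene's sieve.
--     It creates a map of the sum of all primes under i, for all i <= n
--     """
--     sieve = eratosthenes_sieve_under_n(n)
--     all_numbers_under_n = sieve[0]
--     n_length = len(all_numbers_under_n)
--     prime_flags = sieve[1]
--     prime_sum_hash = {}
--     prime_sum = 0
--     for k in range(n_length):
--         if prime_flags[k]:
--             prime_sum += all_numbers_under_n[k]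
--         prime_sum_hash[all_numbers_under_n[k]] = prime_sum
--     return prime_sum_hash
-- ===== SOURCE B (Python) =====
-- def produce_prime_sum_map_under_n(n):
--     """
--     Single pass 2..n: trial-divide each k to test primality, keep a running
--     sum of the primes seen so far, and record it for every k.
--     """
--     result = {}
--     prime_sum = 0
--     for k in range(2, n + 1):
--         is_prime = True
--         d = 2
--         while d * d <= k:
--             if k % d == 0:
--                 is_prime = False
--                 break
--             d += 1
--         if is_prime:
--             prime_sum += k
--         result[k] = prime_sum
--     return result
-- ===== Notes on version B (the rewrite author's own statement) =====
-- stated objective: simpler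
-- what changed: Replaced the two-phase Eratosthenes sieve (build number and flag arrays, cross off multiples, then a second pass summing flagged entries) by a single loop over 2..n that tests each number by trial division up to its square root and accumulates the running prime sum directly.
import Mathlib
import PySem

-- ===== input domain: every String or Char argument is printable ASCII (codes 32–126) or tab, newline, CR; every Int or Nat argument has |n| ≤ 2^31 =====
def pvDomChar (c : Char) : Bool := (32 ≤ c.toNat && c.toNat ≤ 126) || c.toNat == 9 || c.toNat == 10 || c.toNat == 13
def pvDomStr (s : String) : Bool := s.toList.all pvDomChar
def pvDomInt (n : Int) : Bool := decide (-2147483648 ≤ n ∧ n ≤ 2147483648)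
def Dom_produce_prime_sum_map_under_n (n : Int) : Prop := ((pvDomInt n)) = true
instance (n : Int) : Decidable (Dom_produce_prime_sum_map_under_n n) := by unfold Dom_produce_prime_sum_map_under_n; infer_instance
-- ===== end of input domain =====

-- B replaces A's two-phase Eratosthenes sieve by a single loop with per-number trial division
-- and a running prime sum (objective: simpler; not faster).


-- ===== PORT A =====
-- inner 'while prime * coefficient <= n' loop; fuel-driven (fuel is always sufficient:
-- coefficient only grows, and the loop runs at most n steps). The Python assignment
-- prime_flags[prime*coefficient - 2] = False is always in range, pySetD is exact there.
def pvMark (fuel : Nat) (n prime coefficient : Int) (flags : List Bool) : List Bool :=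
  match fuel with
  | 0 => flags
  | fuel + 1 =>
    if prime * coefficient ≤ n then
      pvMark fuel n prime (coefficient + 1)
        (PySem.List.pySetD flags (prime * coefficient - 2) false)
    else flags

-- 'while prime_index < n_length and not prime_flags[prime_index]: prime_index += 1';
-- the read prime_flags[prime_index] has a non-negative in-range index, getD is exact.
def pvSkip (len : Nat) (flags : List Bool) (i : Nat) : Nat :=
  if i < len ∧ flags.getD i false = false then pvSkip len flags (i + 1) else i
termination_by len - i

-- outer 'while prime_index < n_length' loop; fuel-driven (prime_index strictly grows,
-- so fuel = n_length suffices).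
def pvSieveLoop (fuel : Nat) (n : Int) (nums : List Int) (len : Nat)
    (flags : List Bool) (i : Nat) : List Bool :=
  match fuel with
  | 0 => flags
  | fuel + 1 =>
    if i < len then
      let prime := nums.getD i 0
      let flags' := pvMark (n.toNat + 1) n prime 2 flags
      pvSieveLoop fuel n nums len flags' (pvSkip len flags' (i + 1))
    else flags

def eratosthenes_sieve_under_n (n : Int) : List Int × List Bool :=
  let all_numbers_under_n := PySem.List.pyRange 2 (n + 1) 1
  let n_length := all_numbers_under_n.length
  let prime_flags := List.replicate n_length true
  (all_numbers_under_n, pvSieveLoop n_length n all_numbers_under_n n_length prime_flags 0)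

def produce_prime_sum_map_under_n (n : Int) : List (Int × Int) :=
  let sieve := eratosthenes_sieve_under_n n
  let all_numbers_under_n := sieve.1
  let n_length := PySem.List.len all_numbers_under_n
  let prime_flags := sieve.2
  ((PySem.List.pyRange 0 n_length 1).foldl
    (fun (st : PySem.Dict Int Int × Int) k =>
      let prime_sum := if PySem.List.pyGetD prime_flags k false
        then st.2 + PySem.List.pyGetD all_numbers_under_n k 0 else st.2
      (st.1.insert (PySem.List.pyGetD all_numbers_under_n k 0) prime_sum, prime_sum))
    (PySem.Dict.empty, 0)).1.items

-- ===== PORT B =====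
-- 'while d * d <= k' trial-division loop of Source B; fuel-driven (d only grows, ≤ k steps).
def pvTrial (fuel : Nat) (k d : Int) : Bool :=
  match fuel with
  | 0 => true
  | fuel + 1 =>
    if d * d ≤ k then
      if PySem.Int.mod k d = 0 then false else pvTrial fuel k (d + 1)
    else true

def produce_prime_sum_map_under_n_alt (n : Int) : List (Int × Int) :=
  ((PySem.List.pyRange 2 (n + 1) 1).foldl
    (fun (st : PySem.Dict Int Int × Int) k =>
      let is_prime := pvTrial (k.toNat + 1) k 2
      let prime_sum := if is_prime then st.2 + k else st.2
      (st.1.insert k prime_sum, prime_sum))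
    (PySem.Dict.empty, 0)).1.items

-- ===== PRECONDITION & SPEC =====
def Spec_produce_prime_sum_map_under_n (n : Int) (out : List (Int × Int)) : Prop := out = produce_prime_sum_map_under_n_alt n
instance (n : Int) (out : List (Int × Int)) : Decidable (Spec_produce_prime_sum_map_under_n n out) := by unfold Spec_produce_prime_sum_map_under_n; infer_instance

-- ===== CLAIM (what is proved, stated in full; the proofs are below) =====
def Claim_equal_produce_prime_sum_map_under_n : Prop := ∀ (n : Int), Dom_produce_prime_sum_map_under_n n → Spec_produce_prime_sum_map_under_n n (produce_prime_sum_map_under_n n)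

-- ===== LEMMAS AND PROOFS =====

-- proof-side: "index k is crossed off once all primes below i+2 have been processed"
def pvP (i k : Nat) : Prop := ∃ p c : Nat, Nat.Prime p ∧ p < i + 2 ∧ 2 ≤ c ∧ p * c = k + 2

lemma pvP_mono {i j k : Nat} (h : i ≤ j) : pvP i k → pvP j k := by
  rintro ⟨p, c, hp, hlt, hc, he⟩
  exact ⟨p, c, hp, by omega, hc, he⟩

-- a number ≥ 2 is composite iff it is p * c with p prime below any bound ≥ m and c ≥ 2
lemma pvCompIff (m m' : Nat) (h2 : 2 ≤ m) (hle : m ≤ m') :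
    (∃ p c : Nat, Nat.Prime p ∧ p < m' ∧ 2 ≤ c ∧ p * c = m) ↔ ¬ Nat.Prime m := by
  constructor
  · rintro ⟨p, c, hp, hlt, hc, he⟩ hm
    rcases (Nat.prime_mul_iff.mp (he ▸ hm)) with ⟨_, hc1⟩ | ⟨_, hp1⟩
    · omega
    · exact absurd hp1 hp.one_lt.ne'
  · intro hm
    have hne1 : m ≠ 1 := by omega
    have hpf := Nat.minFac_prime hne1
    have hdvd := Nat.minFac_dvd m
    refine ⟨m.minFac, m / m.minFac, hpf, ?_, ?_, Nat.mul_div_cancel' hdvd⟩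
    · have hlt : m.minFac < m := by
        rcases Nat.lt_or_ge m.minFac m with h | h
        · exact h
        · exfalso
          have := Nat.le_antisymm (Nat.le_of_dvd (by omega) hdvd) h
          exact hm (this ▸ hpf)
      omega
    · have hpos : 0 < m.minFac := hpf.pos
      have h1 : m / m.minFac ≠ 0 := by
        intro h0
        have := Nat.div_mul_cancel hdvd
        rw [h0] at this; omega
      have h2' : m / m.minFac ≠ 1 := by
        intro h1'
        have := Nat.div_mul_cancel hdvd
        rw [h1'] at this; simp at this
        exact hm (this ▸ hpf)
      generalize m / m.minFac = d at h1 h2'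
      omega

lemma pvMark_length (fuel : Nat) (n prime c : Int) (flags : List Bool) :
    (pvMark fuel n prime c flags).length = flags.length := by
  induction fuel generalizing c flags with
  | zero => rfl
  | succ fuel ih =>
    simp only [pvMark]
    split
    · rw [ih, PySem.List.length_pySetD]
    · rfl

lemma pvMark_false_iff (fuel : Nat) (n prime c : Int) (flags : List Bool)
    (hp : 2 ≤ prime) (hc : 2 ≤ c) (hlen : (flags.length : Int) = n - 1)
    (hfuel : (n - prime * c + 1).toNat ≤ fuel) (k : Nat) :
    ((pvMark fuel n prime c flags).getD k false = false ↔
      (flags.getD k false = false ∨ ∃ c' : Int, c ≤ c' ∧ prime * c' ≤ n ∧ prime * c' = (k : Int) + 2)) := by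
  induction fuel generalizing c flags with
  | zero =>
    have hgt : n < prime * c := by omega
    simp only [pvMark]
    constructor
    · intro h; exact Or.inl h
    · rintro (h | ⟨c', hcc', hle', _⟩)
      · exact h
      · exfalso
        have : prime * c ≤ prime * c' := by
          exact mul_le_mul_of_nonneg_left hcc' (by omega)
        omega
  | succ fuel ih =>
    simp only [pvMark]
    by_cases hle : prime * c ≤ n
    · simp only [if_pos hle]
      have hidx : (0 : Int) ≤ prime * c - 2 := by nlinarith
      rw [PySem.List.pySetD_of_nonneg flags false hidx]
      have hlen' : (((flags.set (prime * c - 2).toNat false).length : Nat) : Int) = n - 1 := by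
        rw [List.length_set]; exact hlen
      have hprime_c1 : prime * (c + 1) = prime * c + prime := by ring
      have hfuel' : (n - prime * (c + 1) + 1).toNat ≤ fuel := by
        rw [hprime_c1]; omega
      rw [ih (c + 1) _ (by omega) hlen' hfuel']
      have hset : (flags.set (prime * c - 2).toNat false).getD k false = false ↔
          ((k : Int) = prime * c - 2 ∨ flags.getD k false = false) := by
        have hkin : (prime * c - 2).toNat < flags.length := by omega
        rcases eq_or_ne k (prime * c - 2).toNat with hk | hk
        · subst hk
          simp [List.getD_eq_getElem?_getD, hkin]
          omega
        · rw [List.getD_eq_getElem?_getD, List.getElem?_set_ne (by omega),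
              ← List.getD_eq_getElem?_getD]
          constructor
          · intro h; exact Or.inr h
          · rintro (h | h)
            · exfalso; apply hk; omega
            · exact h
      rw [hset]
      constructor
      · rintro ((h | h) | ⟨c', h1, h2, h3⟩)
        · exact Or.inr ⟨c, le_refl c, hle, by omega⟩
        · exact Or.inl h
        · exact Or.inr ⟨c', by omega, h2, h3⟩
      · rintro (h | ⟨c', h1, h2, h3⟩)
        · exact Or.inl (Or.inr h)
        · rcases eq_or_lt_of_le h1 with heq | hlt
          · subst heq; exact Or.inl (Or.inl (by omega))
          · exact Or.inr ⟨c', by omega, h2, h3⟩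
    · simp only [if_neg hle]
      constructor
      · intro h; exact Or.inl h
      · rintro (h | ⟨c', hcc', hle', _⟩)
        · exact h
        · exfalso
          have : prime * c ≤ prime * c' := mul_le_mul_of_nonneg_left hcc' (by omega)
          omega

lemma pvSkip_spec (len : Nat) (flags : List Bool) (i : Nat) :
    i ≤ pvSkip len flags i ∧
    (∀ m, i ≤ m → m < pvSkip len flags i → flags.getD m false = false) ∧
    (pvSkip len flags i < len → flags.getD (pvSkip len flags i) false = true) ∧
    (i ≤ len → pvSkip len flags i ≤ len) := by
  fun_induction pvSkip len flags i with
  | case1 i h ih =>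
    obtain ⟨h1, h2⟩ := h
    refine ⟨by omega, ?_, ih.2.2.1, fun _ => ih.2.2.2 (by omega)⟩
    intro m hm1 hm2
    rcases eq_or_lt_of_le hm1 with heq | hlt
    · exact heq ▸ h2
    · exact ih.2.1 m (by omega) hm2
  | case2 i h =>
    rw [not_and_or] at h
    refine ⟨le_refl i, fun m hm1 hm2 => by omega, ?_, fun h' => h'⟩
    intro hlt
    rcases h with h | h
    · omega
    · simp at h; exact h

lemma pvSieveLoop_spec (fuel : Nat) (n : Int) (nums : List Int) (len : Nat)
    (flags : List Bool) (i : Nat)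
    (hn : (len : Int) = n - 1)
    (hnums : ∀ m, m < len → nums.getD m 0 = (m : Int) + 2)
    (hflen : flags.length = len)
    (hinv : ∀ k, k < len → (flags.getD k false = false ↔ pvP i k))
    (hhead : i < len → flags.getD i false = true)
    (hfuel : len - i ≤ fuel) :
    ∀ k, k < len → ((pvSieveLoop fuel n nums len flags i).getD k false = false ↔ ¬ Nat.Prime (k + 2)) := by
  induction fuel generalizing flags i with
  | zero =>
    -- i ≥ len: loop body not entered
    have hi : len ≤ i := by omega
    intro k hk
    simp only [pvSieveLoop]
    rw [hinv k hk]
    exact pvCompIff (k + 2) (i + 2) (by omega) (by omega)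
  | succ fuel ih =>
    intro k hk
    simp only [pvSieveLoop]
    by_cases hi : i < len
    · simp only [if_pos hi]
      -- the processed number i+2 is prime
      have hprime : Nat.Prime (i + 2) := by
        by_contra hcomp
        have := (pvCompIff (i + 2) (i + 2) (by omega) le_rfl).mpr hcomp
        have hfalse : flags.getD i false = false := (hinv i hi).mpr this
        rw [hhead hi] at hfalse; exact absurd hfalse (by simp)
      have hprim : nums.getD i 0 = (i : Int) + 2 := hnums i hi
      set flags' := pvMark (n.toNat + 1) n (nums.getD i 0) 2 flags with hf'
      have hflen' : flags'.length = len := by rw [hf', pvMark_length, hflen]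
      have hn2 : 2 ≤ n := by omega
      -- flags' is the invariant state for index i+1
      have hinv' : ∀ k', k' < len → (flags'.getD k' false = false ↔ pvP (i + 1) k') := by
        intro k' hk'
        rw [hf', hprim]
        rw [pvMark_false_iff (n.toNat + 1) n ((i : Int) + 2) 2 flags (by omega) le_rfl
          (by rw [hflen]; omega)
          (by
            have h1 : n - ((i : Int) + 2) * 2 + 1 ≤ n := by nlinarith
            calc (n - ((i : Int) + 2) * 2 + 1).toNat ≤ n.toNat := by omega
            _ ≤ n.toNat + 1 := by omega) k']
        rw [hinv k' hk']
        constructor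
        · rintro (h | ⟨c', h1, h2, h3⟩)
          · exact pvP_mono (by omega) h
          · refine ⟨i + 2, c'.toNat, hprime, by omega, by omega, ?_⟩
            have hc' : (c'.toNat : Int) = c' := by omega
            have hcast : ((i + 2 : Nat) : Int) * (c'.toNat : Int) = ((k' : Int) + 2) := by
              push_cast; rw [hc']; linarith
            exact_mod_cast hcast
        · rintro ⟨p, cc, hp, hplt, hcc, he⟩
          by_cases hpi : p < i + 2
          · exact Or.inl ⟨p, cc, hp, hpi, hcc, he⟩
          · have hpe : p = i + 2 := by omega
            subst hpe
            refine Or.inr ⟨(cc : Int), by omega, ?_, ?_⟩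
            · have h1 : ((i + 2) * cc : Nat) = k' + 2 := he
              have h2 : (k' : Int) + 2 ≤ n := by omega
              have : (((i + 2) * cc : Nat) : Int) = (k' : Int) + 2 := by exact_mod_cast h1
              push_cast at this; linarith
            · have : (((i + 2) * cc : Nat) : Int) = (k' : Int) + 2 := by exact_mod_cast he
              push_cast at this; linarith
      set j := pvSkip len flags' (i + 1) with hj
      obtain ⟨hs1, hs2, hs3, hs4⟩ := pvSkip_spec len flags' (i + 1)
      have hjlen : j ≤ len := hs4 (by omega)
      have hinv'' : ∀ k', k' < len → (flags'.getD k' false = false ↔ pvP j k') := by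
        intro k' hk'
        rw [hinv' k' hk']
        constructor
        · exact pvP_mono (by omega)
        · rintro ⟨p, cc, hp, hplt, hcc, he⟩
          by_cases hpi : p < i + 3
          · exact ⟨p, cc, hp, hpi, hcc, he⟩
          · exfalso
            have hm1 : i + 1 ≤ p - 2 := by omega
            have hm2 : p - 2 < j := by omega
            have hmf : flags'.getD (p - 2) false = false := hs2 (p - 2) hm1 hm2
            obtain ⟨q, c2, hq, hqlt, hc2, heq⟩ := (hinv' (p - 2) (by omega)).mp hmf
            have heqp : q * c2 = p := by omega
            rcases Nat.prime_mul_iff.mp (heqp ▸ hp) with ⟨_, h1⟩ | ⟨_, h1⟩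
            · omega
            · exact absurd h1 hq.one_lt.ne'
      exact ih flags' j hflen' hinv'' hs3 (by omega) k hk
    · simp only [if_neg hi]
      rw [hinv k hk]
      exact pvCompIff (k + 2) (i + 2) (by omega) (by omega)

lemma pvSieve_flags (n : Int) (k : Nat) (hk : k < (n - 1).toNat) :
    ((eratosthenes_sieve_under_n n).2.getD k false = false ↔ ¬ Nat.Prime (k + 2)) := by
  have hn2 : 2 ≤ n := by omega
  have hlen : (PySem.List.pyRange 2 (n + 1) 1).length = (n - 1).toNat := by
    rw [PySem.List.length_pyRange_one]; congr 1; omega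
  simp only [eratosthenes_sieve_under_n]
  rw [hlen]
  refine pvSieveLoop_spec _ n _ _ _ 0 (by omega) ?_ ?_ ?_ ?_ (by omega) k hk
  · intro m hm
    rw [List.getD_eq_getElem?_getD, PySem.List.getElem?_pyRange_one,
      if_pos (by omega : m < (n + 1 - 2).toNat)]
    simp only [Option.getD_some]
    omega
  · simp
  · intro k' hk'
    rw [List.getD_eq_getElem?_getD, List.getElem?_replicate]
    simp only [if_pos hk']
    constructor
    · intro h; simp at h
    · rintro ⟨p, c, hp, hplt, -, -⟩
      exact absurd hp.two_le (by omega)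
  · intro h0
    rw [List.getD_eq_getElem?_getD, List.getElem?_replicate, if_pos h0]
    rfl

lemma pvTrial_true_iff (fuel : Nat) (k d : Int) (hd : 2 ≤ d)
    (hfuel : (k - d + 1).toNat ≤ fuel) :
    (pvTrial fuel k d = true ↔ ∀ e : Int, d ≤ e → e * e ≤ k → ¬ (e ∣ k)) := by
  induction fuel generalizing d with
  | zero =>
    have hk : k < d := by omega
    simp only [pvTrial, true_iff]
    intro e he hee _
    have : d * d ≤ e * e := mul_le_mul he he (by omega) (by omega)
    nlinarith
  | succ fuel ih =>
    simp only [pvTrial]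
    by_cases hdd : d * d ≤ k
    · simp only [if_pos hdd]
      by_cases hmod : PySem.Int.mod k d = 0
      · simp only [if_pos hmod]
        have hdvd : d ∣ k := (PySem.Int.mod_eq_zero_iff_dvd k d).mp hmod
        constructor
        · intro h; simp at h
        · intro h; exact absurd hdvd (h d le_rfl hdd)
      · simp only [if_neg hmod]
        rw [ih (d + 1) (by omega) (by omega)]
        have hnd : ¬ (d ∣ k) := fun hdvd => hmod ((PySem.Int.mod_eq_zero_iff_dvd k d).mpr hdvd)
        constructor
        · intro h e he hee hdvd
          rcases eq_or_lt_of_le he with heq | hlt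
          · exact hnd (heq ▸ hdvd)
          · exact h e (by omega) hee hdvd
        · intro h e he hee hdvd
          exact h e (by omega) hee hdvd
    · simp only [if_neg hdd, true_iff]
      intro e he hee _
      have : d * d ≤ e * e := mul_le_mul he he (by omega) (by omega)
      omega

lemma pvTrial_eq_prime (k : Int) (h2 : 2 ≤ k) :
    (pvTrial (k.toNat + 1) k 2 = true ↔ Nat.Prime k.toNat) := by
  rw [pvTrial_true_iff (k.toNat + 1) k 2 le_rfl (by omega)]
  have hk : (k.toNat : Int) = k := by omega
  rw [Nat.prime_def_le_sqrt]
  constructor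
  · intro h
    refine ⟨by omega, ?_⟩
    intro m hm hsq hdvd
    have hmm : m * m ≤ k.toNat := Nat.le_sqrt.mp hsq
    refine h (m : Int) (by exact_mod_cast hm) ?_ ?_
    · rw [← hk]; exact_mod_cast hmm
    · rw [← hk]; exact_mod_cast hdvd
  · rintro ⟨-, h⟩ e he hee hdvd
    have he0 : 0 ≤ e := by omega
    have hent : (e.toNat : Int) = e := by omega
    refine h e.toNat (by omega) ?_ ?_
    · apply Nat.le_sqrt.mpr
      have : (e.toNat * e.toNat : Int) ≤ (k.toNat : Int) := by rw [hent, hk]; exact hee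
      exact_mod_cast this
    · have : (e.toNat : Int) ∣ (k.toNat : Int) := by rw [hent, hk]; exact hdvd
      exact_mod_cast this

lemma pvMain (n : Int) : produce_prime_sum_map_under_n n = produce_prime_sum_map_under_n_alt n := by
  set L := (n - 1).toNat with hL
  have hlen : (PySem.List.pyRange 2 (n + 1) 1).length = L := by
    rw [PySem.List.length_pyRange_one]; congr 1; omega
  have hfst : (eratosthenes_sieve_under_n n).1 = PySem.List.pyRange 2 (n + 1) 1 := rfl
  have hnum : ∀ m, m < L → (PySem.List.pyRange 2 (n + 1) 1).getD m 0 = 2 + (m : Int) := by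
    intro m hm
    rw [List.getD_eq_getElem?_getD, PySem.List.getElem?_pyRange_one,
      if_pos (by omega : m < (n + 1 - 2).toNat)]
    rfl
  have hflag : ∀ m, m < L → (eratosthenes_sieve_under_n n).2.getD m false
      = pvTrial ((2 + (m : Int)).toNat + 1) (2 + (m : Int)) 2 := by
    intro m hm
    have h2m : (2 + (m : Int)).toNat = m + 2 := by omega
    have htrial : (pvTrial ((2 + (m : Int)).toNat + 1) (2 + (m : Int)) 2 = true ↔ Nat.Prime (m + 2)) := by
      rw [pvTrial_eq_prime (2 + (m : Int)) (by omega), h2m]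
    by_cases hp : Nat.Prime (m + 2)
    · have h1 : (eratosthenes_sieve_under_n n).2.getD m false = true := by
        rcases Bool.eq_false_or_eq_true ((eratosthenes_sieve_under_n n).2.getD m false) with hf | hf
        · exact hf
        · exact absurd hp ((pvSieve_flags n m hm).mp hf)
      rw [h1, htrial.mpr hp]
    · have h1 : (eratosthenes_sieve_under_n n).2.getD m false = false := (pvSieve_flags n m hm).mpr hp
      have h2 : pvTrial ((2 + (m : Int)).toNat + 1) (2 + (m : Int)) 2 = false := by
        rcases Bool.eq_false_or_eq_true (pvTrial ((2 + (m : Int)).toNat + 1) (2 + (m : Int)) 2) with hf | hf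
        · exact absurd (htrial.mp hf) hp
        · exact hf
      rw [h1, h2]
  simp only [produce_prime_sum_map_under_n, produce_prime_sum_map_under_n_alt, hfst,
    PySem.List.len_eq, hlen]
  rw [PySem.List.pyRange_one 0 (L : Int), PySem.List.pyRange_one 2 (n + 1)]
  have e1 : ((L : Int) - 0).toNat = L := by omega
  have e2 : (n + 1 - 2).toNat = L := by omega
  rw [e1, e2, List.foldl_map, List.foldl_map]
  apply congrArg
  apply congrArg
  apply PySem.List.foldl_congr_mem
  intro acc m hm
  have hmL : m < L := List.mem_range.mp hm
  simp only [zero_add, PySem.List.pyGetD_natCast]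
  rw [hflag m hmL]
  rw [List.getD_eq_getElem?_getD, List.getElem?_map, List.getElem?_range hmL]
  simp only [Option.map_some, Option.getD_some]

-- ===== VERDICT (by name: the statement is the Claim_ definition above) =====
theorem produce_prime_sum_map_under_n_spec : Claim_equal_produce_prime_sum_map_under_n := by
  intro n _
  exact pvMain n
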